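-- pv_equiv track=rewrite | github.com/kotechile/myTrendAnalysis | blog_idea_generator.py | _categorize_gaps
-- ===== SOURCE A (Python) =====
-- from typing import Dict, Any, List, Optional, Tuple, Set
-- from typing import Dict, Any, List, Optional
--
-- def _categorize_gaps(gaps: List[str]) -> Dict[str, int]:
--     """Categorize content gaps by type"""
--
--     categories = {
--         'tutorial_gaps': 0,
--         'beginner_content_gaps': 0,
--         'advanced_content_gaps': 0,
--         'practical_application_gaps': 0,
--         'tool_comparison_gaps': 0,
--         'case_study_gaps': 0
--     }
--
--     for gap in gaps:
--         gap_lower = gap.lower()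
--
--         if any(word in gap_lower for word in ['tutorial', 'how-to', 'step-by-step']):
--             categories['tutorial_gaps'] += 1
--         elif any(word in gap_lower for word in ['beginner', 'basic', 'introduction']):
--             categories['beginner_content_gaps'] += 1
--         elif any(word in gap_lower for word in ['advanced', 'expert', 'deep']):
--             categories['advanced_content_gaps'] += 1
--         elif any(word in gap_lower for word in ['practical', 'implementation', 'application']):
--             categories['practical_application_gaps'] += 1
--         elif any(word in gap_lower for word in ['comparison', 'vs', 'versus', 'tools']):
--             categories['tool_comparison_gaps'] += 1
--         elif any(word in gap_lower for word in ['case study', 'example', 'real-world']):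
--             categories['case_study_gaps'] += 1
--
--     return categories
-- ===== SOURCE B (Python) =====
-- _CATEGORIES = [
--     ('tutorial_gaps', ['tutorial', 'how-to', 'step-by-step']),
--     ('beginner_content_gaps', ['beginner', 'basic', 'introduction']),
--     ('advanced_content_gaps', ['advanced', 'expert', 'deep']),
--     ('practical_application_gaps', ['practical', 'implementation', 'application']),
--     ('tool_comparison_gaps', ['comparison', 'vs', 'versus', 'tools']),
--     ('case_study_gaps', ['case study', 'example', 'real-world']),
-- ]
--
--
-- def _categorize_gaps(gaps):
--     """Categorize content gaps by type (staged sieve: one pass per category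
--     over the gaps not yet claimed by an earlier category)."""
--     remaining = [g.lower() for g in gaps]
--     counts = {}
--     for name, words in _CATEGORIES:
--         counts[name] = sum(1 for g in remaining if any(w in g for w in words))
--         remaining = [g for g in remaining if not any(w in g for w in words)]
--     return counts
-- ===== Notes on version B (the rewrite author's own statement) =====
-- stated objective: alternative
-- what changed: Replaces A's single pass with a per-gap six-way if/elif cascade by a staged sieve: one counting pass per category (in the same priority order) over the list of still-unclaimed lowercased gaps, filtering out each category's matches before the next pass.
import Mathlib
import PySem

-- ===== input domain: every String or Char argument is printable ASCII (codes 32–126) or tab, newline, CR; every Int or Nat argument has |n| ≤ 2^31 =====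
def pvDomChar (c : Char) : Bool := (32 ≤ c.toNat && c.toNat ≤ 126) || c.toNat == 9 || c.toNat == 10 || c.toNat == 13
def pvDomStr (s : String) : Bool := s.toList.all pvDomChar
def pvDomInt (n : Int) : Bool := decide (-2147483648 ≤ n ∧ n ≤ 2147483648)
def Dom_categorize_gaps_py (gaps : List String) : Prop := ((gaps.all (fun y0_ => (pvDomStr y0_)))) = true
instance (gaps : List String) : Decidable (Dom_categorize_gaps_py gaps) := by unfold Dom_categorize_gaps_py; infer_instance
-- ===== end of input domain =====

-- B replaces A's single pass with a per-gap if/elif cascade by a staged sieve: one counting pass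
-- per category over the gaps not claimed by an earlier category (alternative decomposition, same cost).

-- `any(word in g for word in words)` — the membership test both Pythons contain verbatim
def pvHit (words : List String) (g : String) : Bool := words.any (fun w => PySem.Str.isIn w g)

-- ===== PORT A =====
-- A: one pass over gaps; per gap an if/elif cascade mutates a pre-initialized counts dict
def categorize_gaps_py (gaps : List String) : List (String × Int) :=
  let init : PySem.Dict String Int :=
    ((((((PySem.Dict.empty.insert "tutorial_gaps" 0).insert "beginner_content_gaps" 0).insert
        "advanced_content_gaps" 0).insert "practical_application_gaps" 0).insert
        "tool_comparison_gaps" 0).insert "case_study_gaps" 0)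
  let final := gaps.foldl (fun categories gap =>
    let gap_lower := PySem.Str.lower gap
    if pvHit ["tutorial", "how-to", "step-by-step"] gap_lower then
      categories.modify "tutorial_gaps" 0 (· + 1)
    else if pvHit ["beginner", "basic", "introduction"] gap_lower then
      categories.modify "beginner_content_gaps" 0 (· + 1)
    else if pvHit ["advanced", "expert", "deep"] gap_lower then
      categories.modify "advanced_content_gaps" 0 (· + 1)
    else if pvHit ["practical", "implementation", "application"] gap_lower then
      categories.modify "practical_application_gaps" 0 (· + 1)
    else if pvHit ["comparison", "vs", "versus", "tools"] gap_lower then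
      categories.modify "tool_comparison_gaps" 0 (· + 1)
    else if pvHit ["case study", "example", "real-world"] gap_lower then
      categories.modify "case_study_gaps" 0 (· + 1)
    else categories) init
  final.items

-- ===== PORT B =====
-- B's ordered category table
def pvCATEGORIES : List (String × List String) :=
  [("tutorial_gaps", ["tutorial", "how-to", "step-by-step"]),
   ("beginner_content_gaps", ["beginner", "basic", "introduction"]),
   ("advanced_content_gaps", ["advanced", "expert", "deep"]),
   ("practical_application_gaps", ["practical", "implementation", "application"]),
   ("tool_comparison_gaps", ["comparison", "vs", "versus", "tools"]),
   ("case_study_gaps", ["case study", "example", "real-world"])]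

-- B: lowercase once, then one sieve pass per category over the still-unclaimed gaps:
-- count the matches (the 0/1-sum `sum(1 for …)` is List.countP) and keep the non-matches
def categorize_gaps_py_alt (gaps : List String) : List (String × Int) :=
  let remaining0 := gaps.map PySem.Str.lower
  let final := pvCATEGORIES.foldl (fun st p =>
      (st.1.insert p.1 ((st.2.countP (fun g => pvHit p.2 g) : Nat) : Int),
       st.2.filter (fun g => !(pvHit p.2 g))))
    ((PySem.Dict.empty : PySem.Dict String Int), remaining0)
  final.1.items

-- ===== PRECONDITION & SPEC =====
def Spec_categorize_gaps_py (gaps : List String) (out : List (String × Int)) : Prop := out = categorize_gaps_py_alt gaps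
instance (gaps : List String) (out : List (String × Int)) : Decidable (Spec_categorize_gaps_py gaps out) := by unfold Spec_categorize_gaps_py; infer_instance

-- ===== CLAIM (what is proved, stated in full; the proofs are below) =====
def Claim_equal_categorize_gaps_py : Prop := ∀ (gaps : List String), Dom_categorize_gaps_py gaps → Spec_categorize_gaps_py gaps (categorize_gaps_py gaps)

-- ===== LEMMAS AND PROOFS =====

-- A's six keyword lists
def w0 : List String := ["tutorial", "how-to", "step-by-step"]
def w1 : List String := ["beginner", "basic", "introduction"]
def w2 : List String := ["advanced", "expert", "deep"]
def w3 : List String := ["practical", "implementation", "application"]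
def w4 : List String := ["comparison", "vs", "versus", "tools"]
def w5 : List String := ["case study", "example", "real-world"]

-- "the first category matching gap is i" predicates
def q0 (g : String) : Bool := pvHit w0 (PySem.Str.lower g)
def q1 (g : String) : Bool := !q0 g && pvHit w1 (PySem.Str.lower g)
def q2 (g : String) : Bool := !q0 g && !pvHit w1 (PySem.Str.lower g) && pvHit w2 (PySem.Str.lower g)
def q3 (g : String) : Bool := !q0 g && !pvHit w1 (PySem.Str.lower g) && !pvHit w2 (PySem.Str.lower g) && pvHit w3 (PySem.Str.lower g)
def q4 (g : String) : Bool := !q0 g && !pvHit w1 (PySem.Str.lower g) && !pvHit w2 (PySem.Str.lower g) && !pvHit w3 (PySem.Str.lower g) && pvHit w4 (PySem.Str.lower g)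
def q5 (g : String) : Bool := !q0 g && !pvHit w1 (PySem.Str.lower g) && !pvHit w2 (PySem.Str.lower g) && !pvHit w3 (PySem.Str.lower g) && !pvHit w4 (PySem.Str.lower g) && pvHit w5 (PySem.Str.lower g)

-- A's per-gap step, named for the proofs (definitionally the lambda in the port of A)
def stepA (categories : PySem.Dict String Int) (gap : String) : PySem.Dict String Int :=
    let gap_lower := PySem.Str.lower gap
    if pvHit w0 gap_lower then categories.modify "tutorial_gaps" 0 (· + 1)
    else if pvHit w1 gap_lower then categories.modify "beginner_content_gaps" 0 (· + 1)
    else if pvHit w2 gap_lower then categories.modify "advanced_content_gaps" 0 (· + 1)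
    else if pvHit w3 gap_lower then categories.modify "practical_application_gaps" 0 (· + 1)
    else if pvHit w4 gap_lower then categories.modify "tool_comparison_gaps" 0 (· + 1)
    else if pvHit w5 gap_lower then categories.modify "case_study_gaps" 0 (· + 1)
    else categories

def initA : PySem.Dict String Int :=
  ((((((PySem.Dict.empty.insert "tutorial_gaps" 0).insert "beginner_content_gaps" 0).insert
      "advanced_content_gaps" 0).insert "practical_application_gaps" 0).insert
      "tool_comparison_gaps" 0).insert "case_study_gaps" 0)

def keysL : List String := ["tutorial_gaps","beginner_content_gaps","advanced_content_gaps","practical_application_gaps","tool_comparison_gaps","case_study_gaps"]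

-- the counts dict after A's fold: each category key holds its start value plus the
-- number of gaps whose FIRST matching category is that one
theorem foldA_getD (gaps : List String) (d : PySem.Dict String Int) :
    (gaps.foldl stepA d).getD "tutorial_gaps" 0 = d.getD "tutorial_gaps" 0 + (gaps.countP q0 : Int)
  ∧ (gaps.foldl stepA d).getD "beginner_content_gaps" 0 = d.getD "beginner_content_gaps" 0 + (gaps.countP q1 : Int)
  ∧ (gaps.foldl stepA d).getD "advanced_content_gaps" 0 = d.getD "advanced_content_gaps" 0 + (gaps.countP q2 : Int)
  ∧ (gaps.foldl stepA d).getD "practical_application_gaps" 0 = d.getD "practical_application_gaps" 0 + (gaps.countP q3 : Int)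
  ∧ (gaps.foldl stepA d).getD "tool_comparison_gaps" 0 = d.getD "tool_comparison_gaps" 0 + (gaps.countP q4 : Int)
  ∧ (gaps.foldl stepA d).getD "case_study_gaps" 0 = d.getD "case_study_gaps" 0 + (gaps.countP q5 : Int) := by
  induction gaps generalizing d with
  | nil => simp
  | cons g gs ih =>
    simp only [List.foldl_cons, List.countP_cons]
    obtain ⟨i0, i1, i2, i3, i4, i5⟩ := ih (stepA d g)
    rw [i0, i1, i2, i3, i4, i5]
    unfold stepA
    by_cases h0 : pvHit w0 (PySem.Str.lower g) <;>
    by_cases h1 : pvHit w1 (PySem.Str.lower g) <;>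
    by_cases h2 : pvHit w2 (PySem.Str.lower g) <;>
    by_cases h3 : pvHit w3 (PySem.Str.lower g) <;>
    by_cases h4 : pvHit w4 (PySem.Str.lower g) <;>
    by_cases h5 : pvHit w5 (PySem.Str.lower g) <;>
    simp [h0, h1, h2, h3, h4, h5, q0, q1, q2, q3, q4, q5, PySem.Dict.getD_modify] <;>
    omega

theorem keys_stepA (d : PySem.Dict String Int) (g : String) (h : d.keys = keysL) :
    (stepA d g).keys = keysL := by
  simp only [stepA]
  split_ifs <;>
    first
      | exact h
      | (rw [PySem.Dict.keys_modify,
          PySem.Dict.keys_insert_of_contains _ _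
            ((PySem.Dict.contains_iff_mem_keys _ _).mpr (by rw [h]; decide))]; exact h)

theorem keys_foldA (gaps : List String) (d : PySem.Dict String Int) (h : d.keys = keysL) :
    (gaps.foldl stepA d).keys = keysL := by
  induction gaps generalizing d with
  | nil => exact h
  | cons g gs ih => exact ih _ (keys_stepA d g h)

theorem itemsA (gaps : List String) :
    (gaps.foldl stepA initA).items =
      [("tutorial_gaps", (gaps.countP q0 : Int)), ("beginner_content_gaps", (gaps.countP q1 : Int)),
       ("advanced_content_gaps", (gaps.countP q2 : Int)), ("practical_application_gaps", (gaps.countP q3 : Int)),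
       ("tool_comparison_gaps", (gaps.countP q4 : Int)), ("case_study_gaps", (gaps.countP q5 : Int))] := by
  have hk : (gaps.foldl stepA initA).keys = keysL := keys_foldA gaps initA (by decide)
  have hnd : (gaps.foldl stepA initA).keys.Nodup := by rw [hk]; decide
  rw [PySem.Dict.items_eq_map_keys _ hnd 0, hk]
  obtain ⟨i0,i1,i2,i3,i4,i5⟩ := foldA_getD gaps initA
  have e0 : initA.getD "tutorial_gaps" 0 = 0 := by decide
  have e1 : initA.getD "beginner_content_gaps" 0 = 0 := by decide
  have e2 : initA.getD "advanced_content_gaps" 0 = 0 := by decide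
  have e3 : initA.getD "practical_application_gaps" 0 = 0 := by decide
  have e4 : initA.getD "tool_comparison_gaps" 0 = 0 := by decide
  have e5 : initA.getD "case_study_gaps" 0 = 0 := by decide
  simp only [keysL, List.map]
  rw [i0,i1,i2,i3,i4,i5,e0,e1,e2,e3,e4,e5]
  norm_num

-- B's sieve produces the same six pairs: unfolding the six category passes, pass i counts the
-- gaps matching category i among those filtered past categories 0..i-1 — i.e. first match = i
set_option maxHeartbeats 2000000 in
theorem itemsB (gaps : List String) :
    categorize_gaps_py_alt gaps =
      [("tutorial_gaps", (gaps.countP q0 : Int)), ("beginner_content_gaps", (gaps.countP q1 : Int)),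
       ("advanced_content_gaps", (gaps.countP q2 : Int)), ("practical_application_gaps", (gaps.countP q3 : Int)),
       ("tool_comparison_gaps", (gaps.countP q4 : Int)), ("case_study_gaps", (gaps.countP q5 : Int))] := by
  simp [categorize_gaps_py_alt, pvCATEGORIES, List.countP_filter, List.countP_map,
    PySem.Dict.items_insert, PySem.Dict.contains_insert, PySem.Dict.empty,
    List.cons.injEq, Prod.mk.injEq, Nat.cast_inj]
  refine ⟨?_, ?_, ?_, ?_, ?_, ?_⟩ <;> (apply List.countP_congr; intro g _) <;>
    simp [q0, q1, q2, q3, q4, q5, w0, w1, w2, w3, w4, w5, Function.comp,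
      Bool.and_comm, Bool.and_left_comm, Bool.and_assoc]

-- ===== VERDICT (by name: the statement is the Claim_ definition above) =====
theorem categorize_gaps_py_spec : Claim_equal_categorize_gaps_py := by
  intro gaps _
  show categorize_gaps_py gaps = categorize_gaps_py_alt gaps
  have hA : categorize_gaps_py gaps = (gaps.foldl stepA initA).items := rfl
  rw [hA, itemsA, itemsB]
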